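-- pv_equiv track=rewrite | github.com/sridevi1579/Car-Shopping-AI | tools/carapis_tool.py | _get_trivial_issues
-- ===== SOURCE A (Python) =====
-- _TRIVIAL_ISSUES = [
--     "Minor surface scratches on rear bumper",
--     "Small paint chip on driver-side door",
--     "Light scuff mark on front bumper",
--     "Hairline scratch on trunk lid",
--     "Minor door ding on passenger side",
--     "Small stone chip on hood",
--     "Faint scratch on roof panel",
--     "Slight paint fade on side mirror",
-- ]
--
-- def _get_trivial_issues(vin: str) -> list:
--     """Return 2 unique minor cosmetic notes, varied deterministically by VIN."""
--     idx = sum(ord(c) for c in (vin or "")) % len(_TRIVIAL_ISSUES)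
--     issues = []
--     for offset in range(len(_TRIVIAL_ISSUES)):
--         issue = _TRIVIAL_ISSUES[(idx + offset) % len(_TRIVIAL_ISSUES)]
--         if issue not in issues:
--             issues.append(issue)
--         if len(issues) == 2:
--             break
--     return issues
-- ===== SOURCE B (Python) =====
-- _TRIVIAL_ISSUES = [
--     "Minor surface scratches on rear bumper",
--     "Small paint chip on driver-side door",
--     "Light scuff mark on front bumper",
--     "Hairline scratch on trunk lid",
--     "Minor door ding on passenger side",
--     "Small stone chip on hood",
--     "Faint scratch on roof panel",
--     "Slight paint fade on side mirror",
-- ]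
--
-- def _get_trivial_issues(vin: str) -> list:
--     """Return 2 unique minor cosmetic notes, varied deterministically by VIN."""
--     n = len(_TRIVIAL_ISSUES)
--     idx = sum(ord(c) for c in (vin or "")) % n
--     return [_TRIVIAL_ISSUES[idx], _TRIVIAL_ISSUES[(idx + 1) % n]]
-- ===== Notes on version B (the rewrite author's own statement) =====
-- stated objective: simpler
-- what changed: Replaces A's offset loop with its dedup guard and early break by a closed-form two-element list built by direct modular indexing (valid because all 8 entries are distinct).
import Mathlib
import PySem

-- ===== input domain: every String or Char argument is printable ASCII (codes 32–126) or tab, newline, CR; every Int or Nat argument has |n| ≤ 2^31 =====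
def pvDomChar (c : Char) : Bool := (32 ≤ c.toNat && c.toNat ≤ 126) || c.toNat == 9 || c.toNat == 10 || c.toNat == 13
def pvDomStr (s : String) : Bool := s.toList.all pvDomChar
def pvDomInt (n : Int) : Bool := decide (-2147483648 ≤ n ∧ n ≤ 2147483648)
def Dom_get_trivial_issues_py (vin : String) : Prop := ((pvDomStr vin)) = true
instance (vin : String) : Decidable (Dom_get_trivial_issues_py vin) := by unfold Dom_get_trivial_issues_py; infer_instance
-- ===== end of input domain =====

-- B replaces A's offset loop (with its never-firing dedup guard and early break) by a
-- closed-form two-element list built by direct modular indexing; objective: simpler.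

def trivialIssues : List String :=
  [ "Minor surface scratches on rear bumper",
    "Small paint chip on driver-side door",
    "Light scuff mark on front bumper",
    "Hairline scratch on trunk lid",
    "Minor door ding on passenger side",
    "Small stone chip on hood",
    "Faint scratch on roof panel",
    "Slight paint fade on side mirror" ]

-- ===== PORT A =====
-- A's for-loop over range(len(_TRIVIAL_ISSUES)) with `break` when len(issues)==2,
-- transliterated as a fold over PySem.List.pyRange carrying (issues, done).
-- indexing (idx+offset) % 8 is always in range, ported with getD (exact here).
def get_trivial_issues_py (vin : String) : List String :=
  let base := if vin == "" then "" else vin   -- (vin or "")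
  let idx : Nat := (base.toList.map Char.toNat).sum % trivialIssues.length
  let step : List String × Bool → Int → List String × Bool := fun (issues, done) offset =>
    if done then (issues, done)
    else
      let issue := trivialIssues.getD ((idx + offset.toNat) % trivialIssues.length) ""
      let issues := if issue ∈ issues then issues else issues ++ [issue]
      (issues, issues.length == 2)
  ((PySem.List.pyRange 0 (trivialIssues.length) 1).foldl step ([], false)).1

-- ===== PORT B =====
def get_trivial_issues_py_alt (vin : String) : List String :=
  let base := if vin == "" then "" else vin   -- (vin or "")
  let n := trivialIssues.length
  let idx : Nat := (base.toList.map Char.toNat).sum % n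
  [trivialIssues.getD idx "", trivialIssues.getD ((idx + 1) % n) ""]

-- ===== PRECONDITION & SPEC =====
def Spec_get_trivial_issues_py (vin : String) (out : List String) : Prop := out = get_trivial_issues_py_alt vin
instance (vin : String) (out : List String) : Decidable (Spec_get_trivial_issues_py vin out) := by unfold Spec_get_trivial_issues_py; infer_instance

-- ===== CLAIM (what is proved, stated in full; the proofs are below) =====
def Claim_equal_get_trivial_issues_py : Prop := ∀ (vin : String), Dom_get_trivial_issues_py vin → Spec_get_trivial_issues_py vin (get_trivial_issues_py vin)

-- ===== LEMMAS AND PROOFS =====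

-- abstract both computations over the (bounded) index, then check all 8 cases
def loopA (idx : Nat) : List String :=
  let step : List String × Bool → Int → List String × Bool := fun (issues, done) offset =>
    if done then (issues, done)
    else
      let issue := trivialIssues.getD ((idx + offset.toNat) % trivialIssues.length) ""
      let issues := if issue ∈ issues then issues else issues ++ [issue]
      (issues, issues.length == 2)
  ((PySem.List.pyRange 0 (trivialIssues.length) 1).foldl step ([], false)).1

def directB (idx : Nat) : List String :=
  [trivialIssues.getD idx "", trivialIssues.getD ((idx + 1) % trivialIssues.length) ""]

theorem loop_eq_direct (idx : Nat) (h : idx < 8) : loopA idx = directB idx := by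
  interval_cases idx <;> decide

-- ===== VERDICT (by name: the statement is the Claim_ definition above) =====
theorem get_trivial_issues_py_spec : Claim_equal_get_trivial_issues_py := by
  intro vin _
  show get_trivial_issues_py vin = get_trivial_issues_py_alt vin
  have h := loop_eq_direct
    (((if vin == "" then "" else vin).toList.map Char.toNat).sum % trivialIssues.length)
    (Nat.mod_lt _ (by decide))
  simpa [get_trivial_issues_py, get_trivial_issues_py_alt, loopA, directB] using h
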